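-- pv_equiv track=rewrite | github.com/0xStryK3R/Scaler-DSA-Revision | python/Day-22/CW_1.py | solve
-- ===== SOURCE A (Python) =====
-- def solve(A):
--     ps_arr = [0]
--     for num in A:
--         if num & 1:
--             ps_arr.append(ps_arr[-1] + 1)
--         else:
--             ps_arr.append(ps_arr[-1] - 1)
--
--     hash_A = {}
--
--     ans = 0
--
--     for i, num in enumerate(ps_arr):
--         if num in hash_A:
--             ans = max(ans, i - hash_A[num])
--         else:
--             hash_A[num] = i
--
--     return ans
-- ===== SOURCE B (Python) =====
-- def solve(A):
--     n = len(A)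
--     ans = 0
--     for i in range(n):
--         bal = 0
--         for j in range(i, n):
--             bal += 1 if A[j] & 1 else -1
--             if bal == 0 and j + 1 - i > ans:
--                 ans = j + 1 - i
--     return ans
-- ===== Notes on version B (the rewrite author's own statement) =====
-- stated objective: alternative
-- what changed: Replaces A's prefix-balance array plus first-occurrence hashmap with a direct exhaustive scan: for every start index extend a running odd/even balance and record the longest window where it hits zero; no prefix array and no dictionary, trading A's O(n) pass for an O(n^2) brute force.
import Mathlib
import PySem

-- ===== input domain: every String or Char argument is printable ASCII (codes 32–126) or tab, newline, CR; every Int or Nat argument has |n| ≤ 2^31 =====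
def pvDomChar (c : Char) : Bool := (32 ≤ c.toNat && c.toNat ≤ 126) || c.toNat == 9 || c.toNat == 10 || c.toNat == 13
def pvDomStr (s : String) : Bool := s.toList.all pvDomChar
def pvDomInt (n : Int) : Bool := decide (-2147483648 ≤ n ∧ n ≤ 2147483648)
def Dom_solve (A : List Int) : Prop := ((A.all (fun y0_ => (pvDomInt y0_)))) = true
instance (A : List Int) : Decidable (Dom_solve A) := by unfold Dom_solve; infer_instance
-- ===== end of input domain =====

-- B: exhaustive window scan with a running balance (no prefix array, no hashmap); alternative algorithm, same return value.
-- ===== PORT A =====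
-- A-side helpers: the bodies of A's two loops
def buildStep (ps : List Int) (num : Int) : List Int :=
  -- ps_arr[-1]: ps is always nonempty (starts as [0]), so pyGet? never returns none; getD 0 is unreachable
  let last := (PySem.List.pyGet? ps (-1)).getD 0
  if PySem.Int.band num 1 ≠ 0 then ps ++ [last + 1] else ps ++ [last - 1]

def aStep (st : PySem.Dict Int Int × Int × Int) (num : Int) : PySem.Dict Int Int × Int × Int :=
  let (h, ans, i) := st
  match PySem.Dict.get? h num with
  | some j => (h, max ans (i - j), i + 1)
  | none => (PySem.Dict.insert h num i, ans, i + 1)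

def solve (A : List Int) : Int :=
  let ps_arr := A.foldl buildStep [0]
  (ps_arr.foldl aStep (PySem.Dict.empty, 0, 0)).2.1

-- ===== PORT B =====
-- B-side helper: the body of B's inner loop over j
def bInner (A : List Int) (i : Int) (st : Int × Int) (j : Int) : Int × Int :=
  let (bal, ans) := st
  -- A[j]: j always satisfies 0 ≤ i ≤ j < len A here, so the default 0 is unreachable
  let bal' := bal + (if PySem.Int.band (PySem.List.pyGetD A j 0) 1 ≠ 0 then 1 else -1)
  if bal' = 0 ∧ j + 1 - i > ans then (bal', j + 1 - i) else (bal', ans)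

def solve_alt (A : List Int) : Int :=
  let n : Int := (A.length : Int)
  (PySem.List.pyRange 0 n 1).foldl
    (fun ans i => ((PySem.List.pyRange i n 1).foldl (bInner A i) (0, ans)).2) 0

-- ===== PRECONDITION & SPEC =====
def Spec_solve (A : List Int) (out : Int) : Prop := out = solve_alt A
instance (A : List Int) (out : Int) : Decidable (Spec_solve A out) := by unfold Spec_solve; infer_instance

-- ===== CLAIM (what is proved, stated in full; the proofs are below) =====
def Claim_equal_solve : Prop := ∀ (A : List Int), Dom_solve A → Spec_solve A (solve A)

-- ===== LEMMAS AND PROOFS =====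

-- the ±1 contribution of one element (odd → +1, even → -1)
def stepOf (num : Int) : Int := if PySem.Int.band num 1 ≠ 0 then 1 else -1

-- prefix balance after k elements
def P (A : List Int) (k : ℕ) : Int := ((A.take k).map stepOf).sum

-- the common characterisation of both results: max distance between equal prefix balances (0 if none)
def Good (A : List Int) (r : Int) : Prop :=
  (r = 0 ∨ ∃ i j : ℕ, i < j ∧ j ≤ A.length ∧ P A i = P A j ∧ r = (j : Int) - (i : Int)) ∧
  (∀ i j : ℕ, i < j → j ≤ A.length → P A i = P A j → (j : Int) - (i : Int) ≤ r)

theorem good_unique {A : List Int} {r1 r2 : Int} (h1 : Good A r1) (h2 : Good A r2) : r1 = r2 := by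
  obtain ⟨e1, b1⟩ := h1
  obtain ⟨e2, b2⟩ := h2
  have le12 : r1 ≤ r2 := by
    rcases e1 with h | ⟨i, j, hij, hjn, hp, he⟩
    · rcases e2 with h' | ⟨i, j, hij, hjn, hp, he⟩ <;> omega
    · have := b2 i j hij hjn hp; omega
  have le21 : r2 ≤ r1 := by
    rcases e2 with h | ⟨i, j, hij, hjn, hp, he⟩
    · rcases e1 with h' | ⟨i, j, hij, hjn, hp, he⟩ <;> omega
    · have := b1 i j hij hjn hp; omega
  omega

theorem P_zero (A : List Int) : P A 0 = 0 := rfl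

theorem P_succ (A : List Int) (k : ℕ) (hk : k < A.length) :
    P A (k + 1) = P A k + stepOf A[k] := by
  unfold P
  rw [List.map_take, List.map_take, List.sum_take_succ _ k (by simpa using hk)]
  simp

theorem P_cons (x : Int) (t : List Int) (k : ℕ) :
    P (x :: t) (k + 1) = stepOf x + P t k := by
  simp [P]

-- ===== A side =====
-- prefix-balance sequence starting from balance b (the tail of A's ps_arr)
def pref (b : Int) : List Int → List Int
  | [] => []
  | n :: t =>
      let b' := b + (if PySem.Int.band n 1 ≠ 0 then 1 else -1)
      b' :: pref b' t

-- A's first loop, started from any snoc-shaped accumulator, appends exactly the prefix balances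
theorem build_eq (A : List Int) : ∀ (ps : List Int) (b : Int),
    A.foldl buildStep (ps ++ [b]) = ps ++ [b] ++ pref b A := by
  induction A with
  | nil => intro ps b; simp [pref]
  | cons n t ih =>
      intro ps b
      have hstep : buildStep (ps ++ [b]) n =
          (ps ++ [b]) ++ [b + (if PySem.Int.band n 1 ≠ 0 then 1 else -1)] := by
        simp only [buildStep]
        split <;> simp [PySem.List.pyGet?_neg_one_append_singleton] <;> omega
      simp only [List.foldl_cons, hstep, pref]
      rw [ih (ps ++ [b])]
      simp

theorem pref_eq : ∀ (A : List Int) (b : Int),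
    pref b A = (List.range A.length).map (fun k => b + P A (k + 1)) := by
  intro A
  induction A with
  | nil => intro b; simp [pref]
  | cons x t ih =>
      intro b
      simp only [pref, List.length_cons, List.range_succ_eq_map, List.map_cons, List.map_map]
      simp only [show (if PySem.Int.band x 1 ≠ 0 then (1 : Int) else -1) = stepOf x from rfl]
      congr 1
      · show b + stepOf x = b + P (x :: t) (0 + 1)
        rw [show (0 + 1 : ℕ) = 0 + 1 from rfl, P_cons, P_zero]
        ring
      · rw [ih (b + stepOf x)]
        apply List.map_congr_left
        intro k _
        show b + stepOf x + P t (k + 1) = b + P (x :: t) (Nat.succ k + 1)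
        rw [show Nat.succ k + 1 = (k + 1) + 1 from rfl, P_cons]
        ring

theorem ps_arr_eq (A : List Int) :
    A.foldl buildStep [0] = (List.range (A.length + 1)).map (P A) := by
  have h := build_eq A [] 0
  simp only [List.nil_append] at h
  rw [h, pref_eq]
  rw [List.range_succ_eq_map]
  simp [Function.comp, P_zero]

-- first index j < k with f j = v (what A's dict stores)
def firstIdx (f : ℕ → Int) (v : Int) : ℕ → Option ℕ
  | 0 => none
  | k + 1 =>
      match firstIdx f v k with
      | some j => some j
      | none => if f k = v then some k else none

theorem firstIdx_none {f : ℕ → Int} {v : Int} :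
    ∀ {k : ℕ}, firstIdx f v k = none → ∀ i < k, f i ≠ v := by
  intro k
  induction k with
  | zero => intro _ i hi; omega
  | succ k ih =>
      intro h i hi
      simp only [firstIdx] at h
      cases hc : firstIdx f v k with
      | some j => rw [hc] at h; cases h
      | none =>
          rw [hc] at h
          by_cases hv : f k = v
          · simp [hv] at h
          · rcases Nat.lt_succ_iff_lt_or_eq.mp hi with h' | h'
            · exact ih hc i h'
            · subst h'; exact hv

theorem firstIdx_some {f : ℕ → Int} {v : Int} :
    ∀ {k j : ℕ}, firstIdx f v k = some j → j < k ∧ f j = v ∧ ∀ i < j, f i ≠ v := by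
  intro k
  induction k with
  | zero => intro j h; simp [firstIdx] at h
  | succ k ih =>
      intro j h
      simp only [firstIdx] at h
      cases hc : firstIdx f v k with
      | some j' =>
          rw [hc] at h
          cases h
          obtain ⟨a, b, c⟩ := ih hc
          exact ⟨by omega, b, c⟩
      | none =>
          rw [hc] at h
          by_cases hv : f k = v
          · simp [hv] at h
            subst h
            exact ⟨by omega, hv, fun i hi => firstIdx_none hc i hi⟩
          · simp [hv] at h

-- the invariant of A's dict loop
def DInv (f : ℕ → Int) (k : ℕ) (d : PySem.Dict Int Int) : Prop :=
  ∀ v : Int, PySem.Dict.get? d v = (firstIdx f v k).map (fun j => (j : Int))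

def AInv (f : ℕ → Int) (k : ℕ) (ans : Int) : Prop :=
  0 ≤ ans ∧
  (ans = 0 ∨ ∃ i j : ℕ, i < j ∧ j < k ∧ f i = f j ∧ ans = (j : Int) - (i : Int)) ∧
  (∀ i j : ℕ, i < j → j < k → f i = f j → (j : Int) - (i : Int) ≤ ans)

theorem aFold (f : ℕ → Int) : ∀ (m k : ℕ) (d : PySem.Dict Int Int) (ans : Int),
    DInv f k d → AInv f k ans →
    AInv f (k + m) ((((List.range' k m).map f).foldl aStep (d, ans, (k : Int))).2.1) := by
  intro m
  induction m with
  | zero => intro k d ans _ hA; simpa using hA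
  | succ m ih =>
      intro k d ans hD hA
      rw [List.range'_succ, List.map_cons, List.foldl_cons]
      have hget := hD (f k)
      obtain ⟨hnn, hex, hbd⟩ := hA
      cases hc : firstIdx f (f k) k with
      | some j =>
          obtain ⟨hjk, hfj, hmin⟩ := firstIdx_some hc
          rw [hc] at hget
          have hstep : aStep (d, ans, (k : Int)) (f k) =
              (d, max ans ((k : Int) - (j : Int)), (k : Int) + 1) := by
            simp [aStep, hget]
          rw [hstep]
          have hD' : DInv f (k + 1) d := by
            intro v
            rw [hD v]
            simp only [firstIdx]
            cases hv : firstIdx f v k with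
            | some j' => simp
            | none =>
                by_cases hvk : f k = v
                · rw [← hvk] at hv; rw [hv] at hc; cases hc
                · simp [hvk]
          have hA' : AInv f (k + 1) (max ans ((k : Int) - (j : Int))) := by
            refine ⟨by omega, ?_, ?_⟩
            · rcases le_total ((k : Int) - (j : Int)) ans with h | h
              · rw [max_eq_left h]
                rcases hex with h0 | ⟨i', j', a, b, c, e⟩
                · exact Or.inl h0
                · exact Or.inr ⟨i', j', a, by omega, c, e⟩
              · rw [max_eq_right h]
                exact Or.inr ⟨j, k, hjk, by omega, hfj, rfl⟩
            · intro i' j' hij' hj' hf'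
              rcases Nat.lt_succ_iff_lt_or_eq.mp hj' with h' | h'
              · have := hbd i' j' hij' h' hf'; omega
              · subst h'
                have hji : j ≤ i' := by
                  by_contra hcon
                  exact hmin i' (by omega) hf'
                omega
          have := ih (k + 1) d (max ans ((k : Int) - (j : Int))) hD' hA'
          rw [show k + 1 + m = k + (m + 1) from by omega] at this
          have hcast : ((k : Int) + 1) = ((k + 1 : ℕ) : Int) := by push_cast; ring
          rw [hcast]
          exact this
      | none =>
          rw [hc] at hget
          have hstep : aStep (d, ans, (k : Int)) (f k) =
              (PySem.Dict.insert d (f k) (k : Int), ans, (k : Int) + 1) := by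
            simp [aStep, hget]
          rw [hstep]
          have hD' : DInv f (k + 1) (PySem.Dict.insert d (f k) (k : Int)) := by
            intro v
            rw [PySem.Dict.get?_insert]
            simp only [firstIdx]
            by_cases hvk : v = f k
            · subst hvk
              rw [hc]
              simp
            · rw [if_neg hvk, hD v]
              cases hv : firstIdx f v k with
              | some j' => simp
              | none => simp [Ne.symm hvk]
          have hA' : AInv f (k + 1) ans := by
            refine ⟨hnn, ?_, ?_⟩
            · rcases hex with h0 | ⟨i', j', a, b, c, e⟩
              · exact Or.inl h0
              · exact Or.inr ⟨i', j', a, by omega, c, e⟩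
            · intro i' j' hij' hj' hf'
              rcases Nat.lt_succ_iff_lt_or_eq.mp hj' with h' | h'
              · exact hbd i' j' hij' h' hf'
              · subst h'
                exact absurd hf' (firstIdx_none hc i' hij')
          have := ih (k + 1) (PySem.Dict.insert d (f k) (k : Int)) ans hD' hA'
          rw [show k + 1 + m = k + (m + 1) from by omega] at this
          have hcast : ((k : Int) + 1) = ((k + 1 : ℕ) : Int) := by push_cast; ring
          rw [hcast]
          exact this

theorem solve_good (A : List Int) : Good A (solve A) := by
  have hgood : AInv (P A) (A.length + 1) (solve A) := by
    have h0 : AInv (P A) 0 0 := ⟨le_refl 0, Or.inl rfl, fun i j _ hj _ => absurd hj (Nat.not_lt_zero j)⟩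
    have hD0 : DInv (P A) 0 PySem.Dict.empty := by
      intro v; simp [firstIdx, PySem.Dict.get?_empty]
    have := aFold (P A) (A.length + 1) 0 PySem.Dict.empty 0 hD0 h0
    simp only [Nat.zero_add] at this
    unfold solve
    rwa [ps_arr_eq, List.range_eq_range', Nat.cast_zero] at *
  obtain ⟨hnn, hex, hbd⟩ := hgood
  constructor
  · rcases hex with h0 | ⟨i, j, a, b, c, e⟩
    · exact Or.inl h0
    · exact Or.inr ⟨i, j, a, by omega, c, e⟩
  · intro i j hij hjn hp
    exact hbd i j hij (by omega) hp

-- ===== B side =====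
def InnerP (A : List Int) (i m : ℕ) (ans r : Int) : Prop :=
  ans ≤ r ∧
  (r = ans ∨ ∃ j : ℕ, m < j ∧ j ≤ A.length ∧ P A j = P A i ∧ r = (j : Int) - (i : Int)) ∧
  (∀ j : ℕ, m < j → j ≤ A.length → P A j = P A i → (j : Int) - (i : Int) ≤ r)

theorem bInnerFold (A : List Int) (i : ℕ) :
    ∀ (t m : ℕ) (ans : Int), A.length - m = t → i ≤ m → m ≤ A.length →
    InnerP A i m ans
      (((PySem.List.pyRange (m : Int) (A.length : Int) 1).foldl (bInner A (i : Int))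
        (P A m - P A i, ans)).2) := by
  intro t
  induction t with
  | zero =>
      intro m ans ht him hmn
      have hm : m = A.length := by omega
      subst hm
      rw [PySem.List.pyRange_one_eq_nil (le_refl _)]
      exact ⟨le_refl ans, Or.inl rfl, fun j hj hj' _ => absurd hj (by omega)⟩
  | succ t ih =>
      intro m ans ht him hmn
      have hm : m < A.length := by omega
      rw [PySem.List.pyRange_one_cons (by exact_mod_cast hm), List.foldl_cons]
      have hAj : PySem.List.pyGetD A (m : Int) 0 = A[m] := by
        rw [PySem.List.pyGetD_natCast]
        exact List.getD_eq_getElem A 0 hm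
      have hbal : (P A m - P A i) + (if PySem.Int.band (PySem.List.pyGetD A (m : Int) 0) 1 ≠ 0 then 1 else -1)
          = P A (m + 1) - P A i := by
        rw [hAj, P_succ A m hm]
        simp only [stepOf]
        ring
      have hcast : ((m : Int) + 1) = ((m + 1 : ℕ) : Int) := by push_cast; ring
      simp only [bInner, hbal]
      rw [hcast]
      by_cases hcond : P A (m + 1) - P A i = 0 ∧ ((m + 1 : ℕ) : Int) - (i : Int) > ans
      · rw [if_pos hcond]
        have hih := ih (m + 1) (((m + 1 : ℕ) : Int) - (i : Int)) (by omega) (by omega) (by omega)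
        obtain ⟨hle, hex, hbd⟩ := hih
        refine ⟨by omega, ?_, ?_⟩
        · rcases hex with h0 | ⟨j, a, b, c, e⟩
          · exact Or.inr ⟨m + 1, by omega, by omega, by omega, by omega⟩
          · exact Or.inr ⟨j, by omega, b, c, e⟩
        · intro j hj hjn' hp
          rcases Nat.lt_or_ge (m + 1) j with h' | h'
          · exact hbd j h' hjn' hp
          · have hjm : j = m + 1 := by omega
            subst hjm
            omega
      · rw [if_neg hcond]
        have hih := ih (m + 1) ans (by omega) (by omega) (by omega)
        obtain ⟨hle, hex, hbd⟩ := hih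
        refine ⟨hle, ?_, ?_⟩
        · rcases hex with h0 | ⟨j, a, b, c, e⟩
          · exact Or.inl h0
          · exact Or.inr ⟨j, by omega, b, c, e⟩
        · intro j hj hjn' hp
          rcases Nat.lt_or_ge (m + 1) j with h' | h'
          · exact hbd j h' hjn' hp
          · have hjm : j = m + 1 := by omega
            subst hjm
            have hz : P A (m + 1) - P A i = 0 := by omega
            have hng : ¬ (((m + 1 : ℕ) : Int) - (i : Int) > ans) := fun hgt => hcond ⟨hz, hgt⟩
            omega

def OuterP (A : List Int) (k : ℕ) (ans : Int) : Prop :=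
  0 ≤ ans ∧
  (ans = 0 ∨ ∃ i j : ℕ, i < j ∧ j ≤ A.length ∧ P A i = P A j ∧ ans = (j : Int) - (i : Int)) ∧
  (∀ i j : ℕ, i < k → i < j → j ≤ A.length → P A i = P A j → (j : Int) - (i : Int) ≤ ans)

theorem bOuterFold (A : List Int) : ∀ (t k : ℕ) (ans : Int), A.length - k = t → k ≤ A.length →
    OuterP A k ans →
    OuterP A A.length
      ((PySem.List.pyRange (k : Int) (A.length : Int) 1).foldl
        (fun ans i => ((PySem.List.pyRange i (A.length : Int) 1).foldl (bInner A i) (0, ans)).2) ans) := by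
  intro t
  induction t with
  | zero =>
      intro k ans ht hk hO
      have : k = A.length := by omega
      subst this
      rwa [PySem.List.pyRange_one_eq_nil (le_refl _)]
  | succ t ih =>
      intro k ans ht hk hO
      have hklt : k < A.length := by omega
      rw [PySem.List.pyRange_one_cons (by exact_mod_cast hklt), List.foldl_cons]
      have hstart : (0 : Int) = P A k - P A k := by ring
      have hinner := bInnerFold A k (A.length - k) k ans rfl (le_refl k) (by omega)
      rw [← hstart] at hinner
      obtain ⟨hle, hex, hbd⟩ := hinner
      obtain ⟨hnn, hOex, hObd⟩ := hO
      have hO' : OuterP A (k + 1)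
          (((PySem.List.pyRange (k : Int) (A.length : Int) 1).foldl (bInner A (k : Int)) (0, ans)).2) := by
        refine ⟨by omega, ?_, ?_⟩
        · rcases hex with h0 | ⟨j, a, b, c, e⟩
          · rw [h0]; exact hOex
          · exact Or.inr ⟨k, j, a, b, c.symm, e⟩
        · intro i j hik hij hjn hp
          rcases Nat.lt_succ_iff_lt_or_eq.mp hik with h' | h'
          · have := hObd i j h' hij hjn hp; omega
          · subst h'
            exact hbd j hij hjn hp.symm
      have hcast : ((k : Int) + 1) = ((k + 1 : ℕ) : Int) := by push_cast; ring
      rw [hcast]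
      have h1 : A.length - (k + 1) = t := by
        clear hO' hex hbd hObd hOex hle hnn hstart
        omega
      have h2 : k + 1 ≤ A.length := by omega
      exact ih (k + 1)
        (((PySem.List.pyRange (k : Int) (A.length : Int) 1).foldl (bInner A (k : Int)) (0, ans)).2)
        h1 h2 hO'

theorem solve_alt_good (A : List Int) : Good A (solve_alt A) := by
  have h0 : OuterP A 0 0 :=
    ⟨le_refl 0, Or.inl rfl, fun i j hik _ _ _ => absurd hik (Nat.not_lt_zero i)⟩
  have := bOuterFold A A.length 0 0 (by omega) (by omega) h0
  simp only [Nat.cast_zero] at this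
  obtain ⟨hnn, hex, hbd⟩ := this
  unfold solve_alt
  constructor
  · exact hex
  · intro i j hij hjn hp
    exact hbd i j (by omega) hij hjn hp

-- ===== VERDICT (by name: the statement is the Claim_ definition above) =====
theorem solve_spec : Claim_equal_solve := by
  intro A _
  unfold Spec_solve
  exact good_unique (solve_good A) (solve_alt_good A)
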